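-- pv_equiv track=rewrite | github.com/tzookb/programming-challenges | fb/are_they_equal.py | are_they_equal
-- ===== SOURCE A (Python) =====
-- from collections import Counter
--
-- def are_they_equal(a, b):
--     ac = Counter()
--     bc = Counter()
--     for aitem in a:
--         ac[aitem] += 1
--     for bitem in b:
--         bc[bitem] += 1
--
--     for akey in ac:
--         if akey not in bc:
--             return False
--         if ac[akey] != bc[akey]:
--             return False
--         del bc[akey]
--
--     if len(bc):
--         return False
--
--     return True
-- ===== SOURCE B (Python) =====
-- def are_they_equal(a, b):
--     return sorted(a) == sorted(b)
-- ===== Notes on version B (the rewrite author's own statement) =====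
-- stated objective: simpler
-- what changed: B sorts both lists and compares them for equality, replacing A's two Counter tables, the key-by-key compare-and-delete loop and the final emptiness check.
import Mathlib
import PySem

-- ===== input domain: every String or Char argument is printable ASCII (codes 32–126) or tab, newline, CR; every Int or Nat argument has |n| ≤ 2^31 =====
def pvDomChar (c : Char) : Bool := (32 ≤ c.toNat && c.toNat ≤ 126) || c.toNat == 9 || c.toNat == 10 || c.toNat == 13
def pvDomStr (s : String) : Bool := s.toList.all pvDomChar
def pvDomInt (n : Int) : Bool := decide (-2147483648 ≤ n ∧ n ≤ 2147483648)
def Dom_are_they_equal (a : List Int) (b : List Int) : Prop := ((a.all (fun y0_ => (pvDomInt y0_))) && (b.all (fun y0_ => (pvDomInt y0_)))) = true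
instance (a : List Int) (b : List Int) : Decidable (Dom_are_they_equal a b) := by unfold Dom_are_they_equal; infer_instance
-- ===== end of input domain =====

-- B replaces A's two Counter tables and compare-and-delete loop with sorting both lists and comparing; objective: simpler.


-- ===== PORT A =====
-- the 'for akey in ac' loop: check membership, compare counts, delete from bc; after it, 'if len(bc): return False; return True'
def atePass (ac : PySem.Dict Int Int) : List Int → PySem.Dict Int Int → Bool
  | [], bc => if 0 < bc.size then false else true
  | k :: ks, bc =>
    if ¬ (bc.contains k = true) then false
    else if ac.getD k 0 ≠ bc.getD k 0 then false
    else atePass ac ks (bc.erase k)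

def are_they_equal (a : List Int) (b : List Int) : Bool :=
  let ac := a.foldl (fun d x => d.modify x 0 (· + 1)) PySem.Dict.empty
  let bc := b.foldl (fun d x => d.modify x 0 (· + 1)) PySem.Dict.empty
  atePass ac ac.keys bc

-- ===== PORT B =====
def are_they_equal_alt (a : List Int) (b : List Int) : Bool :=
  PySem.List.sorted a (fun x => x) == PySem.List.sorted b (fun x => x)

-- ===== PRECONDITION & SPEC =====
def Spec_are_they_equal (a : List Int) (b : List Int) (out : Bool) : Prop := out = are_they_equal_alt a b
instance (a : List Int) (b : List Int) (out : Bool) : Decidable (Spec_are_they_equal a b out) := by unfold Spec_are_they_equal; infer_instance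

-- ===== CLAIM (what is proved, stated in full; the proofs are below) =====
def Claim_equal_are_they_equal : Prop := ∀ (a : List Int) (b : List Int), Dom_are_they_equal a b → Spec_are_they_equal a b (are_they_equal a b)

-- ===== LEMMAS AND PROOFS =====

-- facts about Dict.erase (no library lemmas exist for erase)
theorem find?_filter_ne (rest : List (Int × Int)) (k k' : Int) (h : k' ≠ k) :
    (rest.filter (fun p => !p.1 == k)).find? (fun p => p.1 == k') = rest.find? (fun p => p.1 == k') := by
  induction rest with
  | nil => rfl
  | cons p rest ih =>
    by_cases hk : p.1 = k
    · rw [List.filter_cons_of_neg (by simp [hk]), List.find?_cons_of_neg (by simp [hk, Ne.symm h]), ih]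
    · by_cases hk' : p.1 = k'
      · rw [List.filter_cons_of_pos (by simp [hk]), List.find?_cons_of_pos (by simp [hk']),
          List.find?_cons_of_pos (by simp [hk'])]
      · rw [List.filter_cons_of_pos (by simp [hk]), List.find?_cons_of_neg (by simp [hk']),
          List.find?_cons_of_neg (by simp [hk']), ih]

theorem get?_erase_of_ne (d : PySem.Dict Int Int) (k k' : Int) (h : k' ≠ k) :
    (d.erase k).get? k' = d.get? k' := by
  simp only [PySem.Dict.erase, PySem.Dict.get?]
  rw [find?_filter_ne d.items k k' h]

theorem contains_erase_of_ne (d : PySem.Dict Int Int) (k k' : Int) (h : k' ≠ k) :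
    (d.erase k).contains k' = d.contains k' := by
  simp only [PySem.Dict.erase, PySem.Dict.contains]
  induction d.items with
  | nil => rfl
  | cons p rest ih =>
    by_cases hk : p.1 = k
    · rw [List.filter_cons_of_neg (by simp [hk]), ih, List.any_cons]
      simp [hk, Ne.symm h]
    · rw [List.filter_cons_of_pos (by simp [hk]), List.any_cons, List.any_cons, ih]

theorem getD_erase_of_ne (d : PySem.Dict Int Int) (k k' : Int) (h : k' ≠ k) :
    (d.erase k).getD k' 0 = d.getD k' 0 := by
  simp [PySem.Dict.getD, get?_erase_of_ne d k k' h]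

theorem mem_items_erase (d : PySem.Dict Int Int) (k : Int) (p : Int × Int) :
    p ∈ (d.erase k).items ↔ p ∈ d.items ∧ p.1 ≠ k := by
  simp [PySem.Dict.erase, List.mem_filter]

-- characterisation of A's key-by-key loop
theorem atePass_iff (ac : PySem.Dict Int Int) (ks : List Int) (bc : PySem.Dict Int Int)
    (hnd : ks.Nodup) :
    atePass ac ks bc = true ↔
      (∀ k ∈ ks, bc.contains k = true ∧ ac.getD k 0 = bc.getD k 0) ∧
      (∀ p ∈ bc.items, p.1 ∈ ks) := by
  induction ks generalizing bc with
  | nil =>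
    constructor
    · intro h
      refine ⟨by simp, ?_⟩
      intro p hp
      exfalso
      have hne : bc.items ≠ [] := fun he => by simp [he] at hp
      have hlen : 0 < bc.items.length := List.length_pos_iff.mpr hne
      simp [atePass, PySem.Dict.size, hlen] at h
    · rintro ⟨-, h2⟩
      have he : bc.items = [] :=
        List.eq_nil_iff_forall_not_mem.mpr (fun p hp => by simpa using h2 p hp)
      simp [atePass, PySem.Dict.size, he]
  | cons k ks ih =>
    obtain ⟨hk, hnd'⟩ := List.nodup_cons.mp hnd
    simp only [atePass]
    by_cases hc : bc.contains k = true
    · by_cases he : ac.getD k 0 = bc.getD k 0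
      · rw [if_neg (by simp [hc]), if_neg (by simp [he]), ih _ hnd']
        constructor
        · rintro ⟨h1, h2⟩
          refine ⟨?_, ?_⟩
          · intro k' hk'
            rcases List.mem_cons.mp hk' with rfl | hmem
            · exact ⟨hc, he⟩
            · have hne : k' ≠ k := fun hh => hk (hh ▸ hmem)
              have := h1 k' hmem
              rw [contains_erase_of_ne _ _ _ hne, getD_erase_of_ne _ _ _ hne] at this
              exact this
          · intro p hp
            by_cases hpk : p.1 = k
            · simp [hpk]
            · exact List.mem_cons_of_mem _ (h2 p ((mem_items_erase bc k p).mpr ⟨hp, hpk⟩))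
        · rintro ⟨h1, h2⟩
          refine ⟨?_, ?_⟩
          · intro k' hk'
            have hne : k' ≠ k := fun hh => hk (hh ▸ hk')
            have := h1 k' (List.mem_cons_of_mem _ hk')
            rw [contains_erase_of_ne _ _ _ hne, getD_erase_of_ne _ _ _ hne]
            exact this
          · intro p hp
            obtain ⟨hpmem, hpk⟩ := (mem_items_erase bc k p).mp hp
            rcases List.mem_cons.mp (h2 p hpmem) with hh | hh
            · exact absurd hh hpk
            · exact hh
      · rw [if_neg (by simp [hc]), if_pos (by simp [he])]
        constructor
        · intro hh; cases hh
        · rintro ⟨h1, -⟩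
          exact absurd (h1 k List.mem_cons_self).2 he
    · rw [if_pos (by simp [hc])]
      constructor
      · intro hh; cases hh
      · rintro ⟨h1, -⟩
        exact absurd (h1 k List.mem_cons_self).1 hc

-- A returns true exactly on permutations
theorem are_they_equal_iff_perm (a b : List Int) : are_they_equal a b = true ↔ a.Perm b := by
  unfold are_they_equal
  rw [← PySem.Dict.counter_eq_foldl a, ← PySem.Dict.counter_eq_foldl b,
    atePass_iff _ _ _ (by rw [PySem.Dict.keys_counter]; exact PySem.Set.nodup_ofList a)]
  rw [List.perm_iff_count]
  simp only [PySem.Dict.keys_counter, PySem.Dict.contains_counter, PySem.Dict.getD_counter,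
    PySem.Dict.items_counter, PySem.Set.mem_ofList, List.mem_map]
  constructor
  · rintro ⟨h1, h2⟩ x
    by_cases hxa : x ∈ a
    · have := (h1 x hxa).2
      exact_mod_cast this
    · have hxb : x ∉ b := by
        intro hxb
        exact hxa (by simpa using h2 (x, (b.count x : Int)) ⟨x, ⟨hxb, rfl⟩⟩)
      simp [List.count_eq_zero_of_not_mem hxa, List.count_eq_zero_of_not_mem hxb]
  · intro h
    refine ⟨fun k hka => ⟨?_, by exact_mod_cast h k⟩, ?_⟩
    · have : 0 < b.count k := by rw [← h k]; exact List.count_pos_iff.mpr hka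
      simpa using List.count_pos_iff.mp this
    · rintro p ⟨x, hxb, rfl⟩
      have : 0 < a.count x := by rw [h x]; exact List.count_pos_iff.mpr hxb
      exact List.count_pos_iff.mp this

theorem are_they_equal_alt_iff_perm (a b : List Int) :
    are_they_equal_alt a b = true ↔ a.Perm b := by
  unfold are_they_equal_alt
  rw [beq_iff_eq, PySem.List.sorted_id_eq_sorted_id_iff_perm]

-- ===== VERDICT (by name: the statement is the Claim_ definition above) =====
theorem are_they_equal_spec : Claim_equal_are_they_equal := by
  intro a b _
  unfold Spec_are_they_equal
  rw [Bool.eq_iff_iff, are_they_equal_iff_perm, are_they_equal_alt_iff_perm]
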